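-- pv_equiv track=rewrite | github.com/asia-pacific-energy-research-centre/industry_model_9th_edition | workflow/scripts/useful_functions.py | modify_trajectory
-- ===== SOURCE A (Python) =====
-- def modify_trajectory(time_series, chosen_year, new_trajectory):
--     """
--     Modifies the trajectory from a chosen year in the annual time series.
--
--     Args:
--         time_series (dict): The original annual time series.
--         chosen_year (int): The year to overwrite the trajectory.
--         new_trajectory (list): The new trajectory shape to replace the chosen year.
--
--     Returns:
--         dict: The modified annual time series with the new trajectory shape.
--     """
--     modified_series = {}
--
--     for year, value in time_series.items():
--         if year < chosen_year:
--             modified_series[year] = value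
--         elif year == chosen_year:
--             modified_series[year] = value
--         else:
--             modified_series[year] = new_trajectory.pop(0)
--
--     return modified_series
-- ===== SOURCE B (Python) =====
-- def modify_trajectory(time_series, chosen_year, new_trajectory):
--     # Count the years above chosen_year, slice that many replacements off the
--     # front of new_trajectory (same in-place mutation as the original), then
--     # build the result as a single comprehension driven by an iterator.
--     items = list(time_series.items())
--     n = sum(1 for year, _ in items if year > chosen_year)
--     replacements = new_trajectory[:n]
--     del new_trajectory[:n]
--     it = iter(replacements)
--     return {year: (value if year <= chosen_year else next(it))
--             for year, value in items}
-- ===== Notes on version B (the rewrite author's own statement) =====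
-- stated objective: faster
-- what changed: A folds into a dict with repeated O(m) pop(0) calls; B counts the years above chosen_year, slices the replacements off the front once, and builds the result directly in one comprehension driven by an iterator (no dict accumulator, no per-element pop).
import Mathlib
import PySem

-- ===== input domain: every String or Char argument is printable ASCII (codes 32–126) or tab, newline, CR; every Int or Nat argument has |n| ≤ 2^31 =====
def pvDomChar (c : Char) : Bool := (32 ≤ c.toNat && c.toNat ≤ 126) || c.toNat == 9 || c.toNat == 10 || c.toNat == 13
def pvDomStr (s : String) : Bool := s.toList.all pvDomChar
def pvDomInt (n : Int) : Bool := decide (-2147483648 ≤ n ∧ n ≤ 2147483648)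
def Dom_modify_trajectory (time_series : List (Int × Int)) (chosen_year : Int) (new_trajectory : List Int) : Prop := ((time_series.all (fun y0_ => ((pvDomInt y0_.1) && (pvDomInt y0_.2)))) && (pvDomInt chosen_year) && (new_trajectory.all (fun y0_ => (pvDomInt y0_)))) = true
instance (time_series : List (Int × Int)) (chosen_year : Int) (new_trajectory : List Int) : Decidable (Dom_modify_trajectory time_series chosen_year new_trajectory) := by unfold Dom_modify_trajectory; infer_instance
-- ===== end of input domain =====

-- B replaces A's dict-fold with repeated pop(0) by one counting scan, one front slice,
-- and a single comprehension consuming the slice via an iterator; same return values,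
-- and B performs the same front-truncation mutation of new_trajectory as A.


-- ===== PORT A =====
-- the for-loop of A: state = (current dict, remaining new_trajectory); pop(0) = PySem.List.pop? · 0
def modify_trajectory_goA (c : Int) : List (Int × Int) → List Int → PySem.Dict Int Int → PySem.Dict Int Int
  | [], _, d => d
  | (y, v) :: rest, traj, d =>
    if y < c then modify_trajectory_goA c rest traj (d.insert y v)
    else if y = c then modify_trajectory_goA c rest traj (d.insert y v)
    else match PySem.List.pop? traj 0 with
      | some (r, traj') => modify_trajectory_goA c rest traj' (d.insert y r)
      | none => d   -- IndexError from new_trajectory.pop(0); excluded by Pre_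

def modify_trajectory (time_series : List (Int × Int)) (chosen_year : Int) (new_trajectory : List Int) : List (Int × Int) :=
  (modify_trajectory_goA chosen_year time_series new_trajectory PySem.Dict.empty).items

-- ===== PORT B =====
-- B's comprehension: the output pairs are produced directly (keys are distinct, so the
-- dict literal is the association list itself); 'next(it)' = take the head of the
-- remaining replacements slice.
def modify_trajectory_goB (c : Int) : List (Int × Int) → List Int → List (Int × Int)
  | [], _ => []
  | (y, v) :: rest, reps =>
    if y ≤ c then (y, v) :: modify_trajectory_goB c rest reps
    else match reps with
      | r :: reps' => (y, r) :: modify_trajectory_goB c rest reps'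
      | [] => []   -- iterator exhausted (StopIteration); excluded by Pre_

def modify_trajectory_alt (time_series : List (Int × Int)) (chosen_year : Int) (new_trajectory : List Int) : List (Int × Int) :=
  let n := time_series.countP (fun p => chosen_year < p.1)
  let replacements := new_trajectory.take n
  modify_trajectory_goB chosen_year time_series replacements

-- ===== PRECONDITION & SPEC =====
-- Pre_ excludes (a) inputs on which A raises IndexError — more years above chosen_year
-- than new_trajectory has elements — and (b) duplicate years, which are unrepresentable
-- in A's actual argument (time_series is a Python dict, so its keys are distinct).
def Pre_modify_trajectory (time_series : List (Int × Int)) (chosen_year : Int) (new_trajectory : List Int) : Prop :=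
  (time_series.map Prod.fst).Nodup ∧
  time_series.countP (fun p => chosen_year < p.1) ≤ new_trajectory.length
instance (time_series : List (Int × Int)) (chosen_year : Int) (new_trajectory : List Int) : Decidable (Pre_modify_trajectory time_series chosen_year new_trajectory) := by unfold Pre_modify_trajectory; infer_instance

def pvWitness_modify_trajectory : (List (Int × Int)) × Int × List Int := ([(2019, 10), (2020, 11), (2021, 12)], 2020, [7])

def Spec_modify_trajectory (time_series : List (Int × Int)) (chosen_year : Int) (new_trajectory : List Int) (out : List (Int × Int)) : Prop := out = modify_trajectory_alt time_series chosen_year new_trajectory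
instance (time_series : List (Int × Int)) (chosen_year : Int) (new_trajectory : List Int) (out : List (Int × Int)) : Decidable (Spec_modify_trajectory time_series chosen_year new_trajectory out) := by unfold Spec_modify_trajectory; infer_instance

-- ===== CLAIM (what is proved, stated in full; the proofs are below) =====
def Claim_equal_modify_trajectory : Prop := ∀ (time_series : List (Int × Int)) (chosen_year : Int) (new_trajectory : List Int), Dom_modify_trajectory time_series chosen_year new_trajectory → Pre_modify_trajectory time_series chosen_year new_trajectory → Spec_modify_trajectory time_series chosen_year new_trajectory (modify_trajectory time_series chosen_year new_trajectory)

-- ===== LEMMAS AND PROOFS =====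

-- A's dict fold over fresh distinct keys appends exactly the pairs B's pass emits;
-- A consuming the front of (reps ++ tail) matches B consuming reps, as long as reps
-- holds enough replacements for the remaining years above c.
lemma modify_trajectory_go_eq (c : Int) (tail : List Int) :
    ∀ (rest : List (Int × Int)) (reps : List Int) (d : PySem.Dict Int Int),
      (rest.map Prod.fst).Nodup →
      (∀ y ∈ rest.map Prod.fst, d.contains y = false) →
      rest.countP (fun p => c < p.1) ≤ reps.length →
      (modify_trajectory_goA c rest (reps ++ tail) d).items
        = d.items ++ modify_trajectory_goB c rest reps := by
  intro rest
  induction rest with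
  | nil => intro reps d _ _ _; simp [modify_trajectory_goA, modify_trajectory_goB]
  | cons p rest ih =>
    intro reps d hnd hfresh hcnt
    obtain ⟨y, v⟩ := p
    have hndrest : (rest.map Prod.fst).Nodup := (List.nodup_cons.mp (by simpa using hnd)).2
    have hynotin : y ∉ rest.map Prod.fst := (List.nodup_cons.mp (by simpa using hnd)).1
    have hyfresh : d.contains y = false := hfresh y (by simp)
    have hfresh' : ∀ w : Int, ∀ y' ∈ rest.map Prod.fst, (d.insert y w).contains y' = false := by
      intro w y' hy'
      rw [PySem.Dict.contains_insert]
      have : (y' == y) = false := by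
        simp only [beq_eq_false_iff_ne]; rintro rfl; exact hynotin hy'
      simp [this, hfresh y' (by simp [hy'])]
    have hins : ∀ w : Int, (d.insert y w).items = d.items ++ [(y, w)] :=
      fun w => PySem.Dict.items_insert_of_not_contains d w hyfresh
    by_cases hle : y ≤ c
    · have hcnt' : rest.countP (fun p => c < p.1) ≤ reps.length := by
        have : (((y, v) :: rest).countP (fun p => c < p.1)) = rest.countP (fun p => c < p.1) := by
          simp [show ¬ (c < y) by omega]
        omega
      rcases lt_or_eq_of_le hle with hlt | heq
      · simp only [modify_trajectory_goA, modify_trajectory_goB, if_pos hlt, if_pos hle]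
        rw [ih reps _ hndrest (hfresh' v) hcnt', hins v]
        simp
      · simp only [modify_trajectory_goA, modify_trajectory_goB,
          if_neg (by omega : ¬ y < c), if_pos heq, if_pos hle]
        rw [ih reps _ hndrest (hfresh' v) hcnt', hins v]
        simp
    · have hgt : c < y := by omega
      have hc1 : (((y, v) :: rest).countP (fun p => c < p.1))
          = rest.countP (fun p => c < p.1) + 1 := by simp [hgt]
      obtain ⟨r, reps', rfl⟩ : ∃ r reps', reps = r :: reps' := by
        cases reps with
        | nil => exfalso; rw [hc1] at hcnt; simp at hcnt
        | cons a l => exact ⟨a, l, rfl⟩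
      have hcnt' : rest.countP (fun p => c < p.1) ≤ reps'.length := by
        rw [hc1] at hcnt; simpa using hcnt
      simp only [modify_trajectory_goA, modify_trajectory_goB,
        if_neg (by omega : ¬ y < c), if_neg (by omega : ¬ y = c), if_neg hle,
        List.cons_append, PySem.List.pop?_zero_cons]
      rw [ih reps' _ hndrest (hfresh' r) hcnt', hins r]
      simp

-- ===== VERDICT (by name: the statement is the Claim_ definition above) =====
theorem modify_trajectory_spec : Claim_equal_modify_trajectory := by
  intro ts c nt _ hpre
  obtain ⟨hnd, hcnt⟩ := hpre
  unfold Spec_modify_trajectory modify_trajectory modify_trajectory_alt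
  have hlen : (nt.take (ts.countP (fun p => c < p.1))).length = ts.countP (fun p => c < p.1) := by
    simp [List.length_take]; omega
  have h := modify_trajectory_go_eq c (nt.drop (ts.countP (fun p => c < p.1))) ts
      (nt.take (ts.countP (fun p => c < p.1))) PySem.Dict.empty hnd
      (by intro y _; simp [PySem.Dict.contains_empty]) (by rw [hlen])
  rw [List.take_append_drop] at h
  simpa using h
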